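-- pv_equiv track=rewrite | github.com/aonzuza/codingInterview | books/Hash_Tables/cut_brick_wall.py | find_min_cut
-- ===== SOURCE A (Python) =====
-- from collections import defaultdict;
--
-- def find_min_cut(wall):
--
--     dd = defaultdict(int);
--     selected_length = 0;
--
--     for row in wall:
--
--         length = 0;
--
--         for brick in row[:-1]:
--             length = length + brick;
--             dd[length] = dd[length] + 1;
--
--     return len(wall) - max(dd.values());
-- ===== SOURCE B (Python) =====
-- def find_min_cut(wall):
--     # Collect every internal cut position (prefix sums of each row minus its
--     # last brick), sort them, then one linear scan finds the longest run of
--     # equal positions = the most-aligned edge.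
--     cuts = []
--     for row in wall:
--         s = 0
--         for brick in row[:-1]:
--             s += brick
--             cuts.append(s)
--     cuts.sort()
--     prev = None
--     run = 0
--     best = 0
--     for c in cuts:
--         if prev is not None and c == prev:
--             run += 1
--         else:
--             run = 1
--             prev = c
--         if run > best:
--             best = run
--     return len(wall) - best
-- ===== Notes on version B (the rewrite author's own statement) =====
-- stated objective: alternative
-- what changed: Replaces the incrementally built defaultdict counter and max over its values by a flat list of all cut positions that is sorted once and scanned for the longest run of equal consecutive values; Pre_ excludes the walls with no internal cut position (no row of two or more bricks), where A's max() raises ValueError.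
import Mathlib
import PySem

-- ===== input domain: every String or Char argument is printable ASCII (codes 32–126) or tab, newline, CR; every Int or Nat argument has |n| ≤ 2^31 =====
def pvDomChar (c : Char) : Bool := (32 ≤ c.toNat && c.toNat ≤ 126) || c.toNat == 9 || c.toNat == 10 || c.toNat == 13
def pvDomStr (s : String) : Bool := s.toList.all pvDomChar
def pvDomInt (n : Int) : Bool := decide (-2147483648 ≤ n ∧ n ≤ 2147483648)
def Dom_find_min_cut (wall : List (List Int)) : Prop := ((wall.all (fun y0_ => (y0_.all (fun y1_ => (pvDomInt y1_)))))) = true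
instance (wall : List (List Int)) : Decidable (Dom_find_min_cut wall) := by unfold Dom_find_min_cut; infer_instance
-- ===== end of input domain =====

-- B replaces A's incrementally built defaultdict counter (max over its values) by a flat
-- sorted list of cut positions scanned once for the longest run of equal values (alternative
-- decomposition, not claimed faster); on inputs outside Pre_ (A raises there) B returns len(wall).

-- ===== PORT A =====
-- (A's local 'selected_length = 0' is dead code and has no Lean counterpart.)
def find_min_cut (wall : List (List Int)) : Int :=
  let dd : PySem.Dict Int Int :=
    wall.foldl (fun dd row =>
      ((PySem.List.slice row none (some (-1))).foldl
        (fun (st : PySem.Dict Int Int × Int) brick =>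
          let length := st.2 + brick
          (st.1.modify length 0 (· + 1), length))
        (dd, 0)).1)
    PySem.Dict.empty
  match PySem.List.max? dd.values (fun v => v) with
  | some m => (wall.length : Int) - m
  | none => 0   -- Python: max() raises ValueError here; excluded by Pre_find_min_cut

-- ===== PORT B =====
-- the loop body of B's final scan (prev, run, best)
def bstep (st : Option Int × Int × Int) (c : Int) : Option Int × Int × Int :=
  let prun := if st.1 = some c then (st.1, st.2.1 + 1) else (some c, (1 : Int))
  (prun.1, prun.2, if prun.2 > st.2.2 then prun.2 else st.2.2)

def find_min_cut_alt (wall : List (List Int)) : Int :=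
  let cuts : List Int :=
    wall.foldl (fun cuts row =>
      ((PySem.List.slice row none (some (-1))).foldl
        (fun (st : List Int × Int) brick =>
          let s := st.2 + brick
          (st.1 ++ [s], s))
        (cuts, 0)).1)
    []
  let srt := PySem.List.sorted cuts (fun x => x) false
  let fin := srt.foldl bstep (none, 0, 0)
  (wall.length : Int) - fin.2.2

-- ===== PRECONDITION & SPEC =====
-- Pre_ excludes exactly the inputs where A raises ValueError (max() of an empty sequence):
-- walls in which no row has at least two bricks, so there is no internal cut position.
def Pre_find_min_cut (wall : List (List Int)) : Prop :=
  (wall.any (fun row => decide (2 ≤ row.length))) = true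
instance (wall : List (List Int)) : Decidable (Pre_find_min_cut wall) := by
  unfold Pre_find_min_cut; infer_instance
def pvWitness_find_min_cut : List (List Int) := [[1, 2], [3]]

def Spec_find_min_cut (wall : List (List Int)) (out : Int) : Prop := out = find_min_cut_alt wall
instance (wall : List (List Int)) (out : Int) : Decidable (Spec_find_min_cut wall out) := by
  unfold Spec_find_min_cut; infer_instance

-- ===== CLAIM (what is proved, stated in full; the proofs are below) =====
def Claim_equal_find_min_cut : Prop := ∀ (wall : List (List Int)), Dom_find_min_cut wall → Pre_find_min_cut wall → Spec_find_min_cut wall (find_min_cut wall)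

-- ===== LEMMAS AND PROOFS =====

-- prefix sums of l starting from s (the successive values of 'length'/'s' in both loops)
def pref (s : Int) : List Int → List Int
  | [] => []
  | b :: t => (s + b) :: pref (s + b) t

-- all internal cut positions of the wall, row by row
def cutsOf (wall : List (List Int)) : List Int :=
  wall.flatMap (fun row => pref 0 row.dropLast)

-- maximal multiplicity of an element of l (0 for empty l)
def M (l : List Int) : Int :=
  (l.map (fun k => (l.count k : Int))).foldl max 0

lemma M_nonneg (l : List Int) : 0 ≤ M l := by
  exact (PySem.List.le_foldl_max (l.map (fun k => (l.count k : Int))) 0).1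

lemma M_ge_count (l : List Int) {k : Int} (h : k ∈ l) : (l.count k : Int) ≤ M l := by
  exact (PySem.List.le_foldl_max _ 0).2 _ (List.mem_map.mpr ⟨k, h, rfl⟩)

lemma M_le (l : List Int) {b : Int} (hb : 0 ≤ b)
    (h : ∀ k ∈ l, (l.count k : Int) ≤ b) : M l ≤ b := by
  rcases PySem.List.foldl_max_mem (l.map (fun k => (l.count k : Int))) 0 with h0 | hm
  · rw [M, h0]; exact hb
  · rcases List.mem_map.mp hm with ⟨k, hk, he⟩
    rw [M, ← he]; exact h k hk

lemma M_perm {l₁ l₂ : List Int} (h : l₁.Perm l₂) : M l₁ = M l₂ := by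
  apply le_antisymm
  · exact M_le _ (M_nonneg _) (fun k hk => by
      rw [h.count_eq]; exact M_ge_count _ (h.mem_iff.mp hk))
  · exact M_le _ (M_nonneg _) (fun k hk => by
      rw [← h.count_eq]; exact M_ge_count _ (h.mem_iff.mpr hk))

lemma count_append_singleton_of_ne (u : List Int) {k c : Int} (h : k ≠ c) :
    (u ++ [c]).count k = u.count k := by
  simp [List.count_append, Ne.symm h]

lemma M_append (u : List Int) (c : Int) :
    M (u ++ [c]) = max (M u) (((u ++ [c]).count c : Int)) := by
  apply le_antisymm
  · apply M_le _ (le_trans (M_nonneg u) (le_max_left _ _))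
    intro k hk
    by_cases hkc : k = c
    · subst hkc; exact le_max_right _ _
    · rcases List.mem_append.mp hk with hku | hc
      · rw [count_append_singleton_of_ne u hkc]
        exact le_trans (M_ge_count u hku) (le_max_left _ _)
      · exact absurd (List.mem_singleton.mp hc) hkc
  · apply max_le
    · apply M_le u (M_nonneg _)
      intro k hk
      refine le_trans ?_ (M_ge_count (u ++ [c]) (List.mem_append_left _ hk))
      exact_mod_cast (List.sublist_append_left u [c]).count_le k
    · exact M_ge_count _ (by simp)

lemma le_getLast_of_pairwise {u : List Int} (hp : u.Pairwise (· ≤ ·))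
    {x : Int} (hx : x ∈ u) (hne : u ≠ []) : x ≤ u.getLast hne := by
  induction u with
  | nil => cases hx
  | cons a t ih =>
    cases t with
    | nil =>
      rcases List.mem_singleton.mp hx with rfl
      simp [List.getLast]
    | cons b t' =>
      rw [List.getLast_cons (by simp : (b :: t') ≠ [])]
      rcases List.mem_cons.mp hx with rfl | hx'
      · exact (List.pairwise_cons.mp hp).1 _ (List.getLast_mem _)
      · exact ih (List.pairwise_cons.mp hp).2 hx' (by simp)

-- inner loop of A: folding a row's prefix over (dict, running length)
lemma innerA (l : List Int) (d : PySem.Dict Int Int) (s : Int) :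
    l.foldl (fun (st : PySem.Dict Int Int × Int) brick =>
        let length := st.2 + brick
        (st.1.modify length 0 (· + 1), length)) (d, s)
    = ((pref s l).foldl (fun d x => d.modify x 0 (· + 1)) d, s + l.sum) := by
  induction l generalizing d s with
  | nil => simp [pref]
  | cons b t ih => simp [pref, ih, add_assoc]

-- foldl over rows of a fold is a fold over the flattened cut list
lemma foldl_over_rows {β : Type} (g : β → Int → β) (wall : List (List Int)) (d : β) :
    wall.foldl (fun d row => (pref 0 row.dropLast).foldl g d) d
    = (wall.flatMap (fun row => pref 0 row.dropLast)).foldl g d := by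
  induction wall generalizing d with
  | nil => rfl
  | cons row rest ih => simp [List.foldl_append, ih]

-- A's dict is the counter of all cut positions
lemma ddA (wall : List (List Int)) (d : PySem.Dict Int Int) :
    wall.foldl (fun dd row =>
      ((PySem.List.slice row none (some (-1))).foldl
        (fun (st : PySem.Dict Int Int × Int) brick =>
          let length := st.2 + brick
          (st.1.modify length 0 (· + 1), length))
        (dd, 0)).1) d
    = (cutsOf wall).foldl (fun d x => d.modify x 0 (· + 1)) d := by
  simp only [PySem.List.slice_to_neg_one, innerA]
  exact foldl_over_rows _ wall d

-- inner loop of B: folding a row's prefix over (list, running sum)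
lemma innerB (l : List Int) (acc : List Int) (s : Int) :
    l.foldl (fun (st : List Int × Int) brick =>
        let s := st.2 + brick
        (st.1 ++ [s], s)) (acc, s)
    = (acc ++ pref s l, s + l.sum) := by
  induction l generalizing acc s with
  | nil => simp [pref]
  | cons b t ih => simp [pref, ih, add_assoc]

-- B's flat list is all cut positions
lemma cutsB (wall : List (List Int)) (acc : List Int) :
    wall.foldl (fun cuts row =>
      ((PySem.List.slice row none (some (-1))).foldl
        (fun (st : List Int × Int) brick =>
          let s := st.2 + brick
          (st.1 ++ [s], s))
        (cuts, 0)).1) acc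
    = acc ++ cutsOf wall := by
  simp only [PySem.List.slice_to_neg_one, innerB]
  rw [PySem.List.foldl_append_eq_flatMap]
  rfl

-- B's scan over a sorted non-empty list computes the maximal multiplicity
lemma scan_spec (u : List Int) (hp : u.Pairwise (· ≤ ·)) (hne : u ≠ []) :
    u.foldl bstep (none, 0, 0)
    = (some (u.getLast hne), ((u.count (u.getLast hne) : Nat) : Int), M u) := by
  induction u using List.reverseRecOn with
  | nil => exact absurd rfl hne
  | append_singleton v c ih =>
    rcases List.pairwise_append.mp hp with ⟨hpv, -, hcross⟩
    by_cases hv : v = []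
    · subst hv
      simp only [List.nil_append, List.foldl_cons, List.foldl_nil]
      simp [bstep, M, List.getLast]
    · have hle : ∀ x ∈ v, x ≤ c := fun x hx => hcross x hx c (by simp)
      have hlast : (v ++ [c]).getLast (by simp) = c := by
        simp
      rw [List.foldl_append, List.foldl_cons, List.foldl_nil, ih hpv hv]
      by_cases hc : c = v.getLast hv
      · have hprev : some (v.getLast hv) = some c := by rw [hc]
        have hcnt : (v ++ [c]).count c = v.count c + 1 := by
          simp [List.count_append]
        simp only [bstep, hprev]
        refine Prod.ext (by simp [hlast]) (Prod.ext ?_ ?_)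
        · simp only [hlast, hcnt, ← hc]
          push_cast; ring
        · show (if (v.count (v.getLast hv) : Int) + 1 > M v then (v.count (v.getLast hv) : Int) + 1 else M v) = M (v ++ [c])
          rw [M_append v c, hcnt, ← hc]
          push_cast
          omega
      · have hne2 : (some (v.getLast hv) = some c) = False := by
          simp [Option.some.injEq]; exact fun h => hc h.symm
        have hnotmem : c ∉ v := by
          intro hmem
          exact hc (le_antisymm (hle _ (List.getLast_mem hv)) (le_getLast_of_pairwise hpv hmem hv)).symm
        have hcnt : (v ++ [c]).count c = 1 := by
          simp [List.count_append, List.count_eq_zero.mpr hnotmem]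
        have hMv : (1 : Int) ≤ M v := by
          refine le_trans ?_ (M_ge_count v (List.getLast_mem hv))
          have : 1 ≤ v.count (v.getLast hv) := List.count_pos_iff.mpr (List.getLast_mem hv)
          exact_mod_cast this
        simp only [bstep, hne2, if_false]
        refine Prod.ext (by simp [hlast]) (Prod.ext ?_ ?_)
        · simp [hlast, hcnt]
        · show (if (1 : Int) > M v then (1 : Int) else M v) = M (v ++ [c])
          rw [M_append v c, hcnt]
          push_cast
          omega

lemma pref_eq_nil_iff {s : Int} {l : List Int} : pref s l = [] ↔ l = [] := by
  cases l <;> simp [pref]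

-- Pre_ says exactly that there is at least one cut position
lemma cutsOf_ne_nil {wall : List (List Int)} (hpre : Pre_find_min_cut wall) :
    cutsOf wall ≠ [] := by
  unfold Pre_find_min_cut at hpre
  simp only [List.any_eq_true, decide_eq_true_eq] at hpre
  rcases hpre with ⟨row, hmem, h2⟩
  intro hnil
  have := List.flatMap_eq_nil_iff.mp hnil row hmem
  have hd : row.dropLast ≠ [] := by
    intro h
    have := congrArg List.length h
    simp [List.length_dropLast] at this
    omega
  exact hd (pref_eq_nil_iff.mp this)

-- the max over the counter's values is M
lemma maxValues (P : List Int) (hne : P ≠ []) :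
    PySem.List.max? (PySem.Dict.counter P).values (fun v => v) = some (M P) := by
  have hvals : (PySem.Dict.counter P).values
      = (PySem.Set.ofList P).map (fun k => (P.count k : Int)) := by
    show ((PySem.Dict.counter P).items).map (·.2) = _
    rw [PySem.Dict.items_counter]
    simp [List.map_map, Function.comp]
  have hmemP : ∀ k ∈ PySem.Set.ofList P, k ∈ P := fun k hk =>
    (PySem.Set.mem_ofList P k).mp hk
  rcases hof : PySem.Set.ofList P with _ | ⟨k₀, ks⟩
  · rcases List.exists_mem_of_ne_nil P hne with ⟨x, hx⟩
    have := (PySem.Set.mem_ofList P x).mpr hx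
    rw [hof] at this; cases this
  · rw [hvals, hof, List.map_cons, PySem.List.max?_id_cons]
    congr 1
    have hk₀ : k₀ ∈ P := hmemP k₀ (by rw [hof]; simp)
    have hks : ∀ k ∈ ks, k ∈ P := fun k hk => hmemP k (by rw [hof]; simp [hk])
    apply le_antisymm
    · rcases PySem.List.foldl_max_mem (ks.map (fun k => (P.count k : Int))) ((P.count k₀ : Int)) with h0 | hm
      · rw [h0]; exact M_ge_count P hk₀
      · rcases List.mem_map.mp hm with ⟨k, hk, he⟩
        rw [← he]; exact M_ge_count P (hks k hk)
    · apply M_le P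
      · exact le_trans (by positivity) ((PySem.List.le_foldl_max _ _).1)
      · intro k hk
        have : k ∈ PySem.Set.ofList P := (PySem.Set.mem_ofList P k).mpr hk
        rw [hof] at this
        rcases List.mem_cons.mp this with rfl | hin
        · exact (PySem.List.le_foldl_max _ _).1
        · exact (PySem.List.le_foldl_max _ _).2 _ (List.mem_map.mpr ⟨k, hin, rfl⟩)

-- ===== VERDICT (by name: the statement is the Claim_ definition above) =====
theorem find_min_cut_spec : Claim_equal_find_min_cut := by
  intro wall _ hpre
  unfold Spec_find_min_cut
  have hP : cutsOf wall ≠ [] := cutsOf_ne_nil hpre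
  -- A side
  have hA : find_min_cut wall = (wall.length : Int) - M (cutsOf wall) := by
    have h1 : find_min_cut wall
        = (match PySem.List.max? (PySem.Dict.counter (cutsOf wall)).values (fun v => v) with
           | some m => ((wall.length : Int)) - m
           | none => 0) := by
      unfold find_min_cut
      rw [ddA wall PySem.Dict.empty, ← PySem.Dict.counter_eq_foldl]
    rw [h1, maxValues _ hP]
  -- B side
  have hSperm : (PySem.List.sorted (cutsOf wall) (fun x => x) false).Perm (cutsOf wall) :=
    PySem.List.sorted_perm _ _ _
  have hSne : PySem.List.sorted (cutsOf wall) (fun x => x) false ≠ [] := by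
    rw [Ne, PySem.List.sorted_eq_nil_iff]; exact hP
  have hSp : (PySem.List.sorted (cutsOf wall) (fun x => x) false).Pairwise (· ≤ ·) :=
    PySem.List.sorted_pairwise _ _
  have hB : find_min_cut_alt wall = (wall.length : Int) - M (cutsOf wall) := by
    have h1 : find_min_cut_alt wall
        = (wall.length : Int)
          - ((PySem.List.sorted (cutsOf wall) (fun x => x) false).foldl bstep (none, 0, 0)).2.2 := by
      unfold find_min_cut_alt
      rw [cutsB wall []]
      rfl
    rw [h1, scan_spec _ hSp hSne, M_perm hSperm]
  rw [hA, hB]
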